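-- pv_equiv track=rewrite | github.com/MicheleMarschner/BeyondLiteral_Idiomaticity_Detection_ANLP_Project | src/analysis_submodule/analysis_Michele/utils/plots.py | pretty_title
-- ===== SOURCE A (Python) =====
-- def pretty_title(text: str) -> str:
--     out = str(text)
--
--     replacements = {
--         "zero_shot": "Zero Shot",
--         "one_shot": "One Shot",
--         "logreg_tfidf": "LogReg TF-IDF",
--         "logreg_word2vec": "LogReg Word2Vec",
--         "macro_f1": "Macro-F1",
--     }
--
--     for old, new in replacements.items():
--         out = out.replace(old, new)
--
--     return out
-- ===== SOURCE B (Python) =====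
-- def pretty_title(text: str) -> str:
--     # one left-to-right pass: at each position try the (non-overlapping) keys in order
--     repl = [
--         ("zero_shot", "Zero Shot"),
--         ("one_shot", "One Shot"),
--         ("logreg_tfidf", "LogReg TF-IDF"),
--         ("logreg_word2vec", "LogReg Word2Vec"),
--         ("macro_f1", "Macro-F1"),
--     ]
--     s = str(text)
--     parts = []
--     i = 0
--     n = len(s)
--     while i < n:
--         for old, new in repl:
--             if s.startswith(old, i):
--                 parts.append(new)
--                 i += len(old)
--                 break
--         else:
--             parts.append(s[i])
--             i += 1
--     return "".join(parts)
-- ===== Notes on version B (the rewrite author's own statement) =====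
-- stated objective: alternative
-- what changed: A runs five sequential full-string .replace passes (one per mapping entry); B makes a single left-to-right scan that at each position tries the non-overlapping keys in order, emitting the replacement or copying the character, equal because the keys are mutually non-overlapping and no replacement value re-creates a key.
import Mathlib
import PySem

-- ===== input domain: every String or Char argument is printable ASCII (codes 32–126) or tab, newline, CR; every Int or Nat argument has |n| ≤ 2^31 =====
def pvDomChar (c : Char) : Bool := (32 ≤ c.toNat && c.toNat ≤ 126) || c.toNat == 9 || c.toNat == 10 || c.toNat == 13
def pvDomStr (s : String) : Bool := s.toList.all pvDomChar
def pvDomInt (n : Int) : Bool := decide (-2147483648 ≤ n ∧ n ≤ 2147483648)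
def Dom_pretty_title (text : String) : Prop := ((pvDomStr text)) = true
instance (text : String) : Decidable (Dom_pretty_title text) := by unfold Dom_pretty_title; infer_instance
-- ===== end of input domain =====

-- B replaces A's five sequential full-string .replace passes by one left-to-right scan that
-- tries the (non-overlapping, non-cascading) keys at each position; same return value.

-- ===== PORT A =====
def pretty_title (text : String) : String :=
  let out := text
  let out := PySem.Str.replace out "zero_shot" "Zero Shot"
  let out := PySem.Str.replace out "one_shot" "One Shot"
  let out := PySem.Str.replace out "logreg_tfidf" "LogReg TF-IDF"
  let out := PySem.Str.replace out "logreg_word2vec" "LogReg Word2Vec"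
  let out := PySem.Str.replace out "macro_f1" "Macro-F1"
  out

-- ===== PORT B =====
-- the replacement table of Source B, as (old, new) char lists in the same order
def pvKeys : List (List Char × List Char) :=
  [("zero_shot".toList, "Zero Shot".toList),
   ("one_shot".toList, "One Shot".toList),
   ("logreg_tfidf".toList, "LogReg TF-IDF".toList),
   ("logreg_word2vec".toList, "LogReg Word2Vec".toList),
   ("macro_f1".toList, "Macro-F1".toList)]

-- Source B's while loop: at each position, the first table key that matches is emitted and skipped,
-- otherwise the character is copied (hks only justifies termination: i advances by len(old) ≥ 1)
def pvScanK (ks : List (List Char × List Char)) (hks : ∀ p ∈ ks, p.1 ≠ ([] : List Char)) :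
    List Char → List Char
  | [] => []
  | c :: t =>
    match h : ks.find? (fun p => p.1.isPrefixOf (c :: t)) with
    | some p => p.2 ++ pvScanK ks hks ((c :: t).drop p.1.length)
    | none => c :: pvScanK ks hks t
  termination_by s => s.length
  decreasing_by
  · have hm : p ∈ ks := List.mem_of_find?_eq_some h
    have h1 : p.1 ≠ ([] : List Char) := hks p hm
    have h2 : 0 < p.1.length := List.length_pos_of_ne_nil h1
    simp only [List.length_drop, List.length_cons]
    omega
  · simp

def pretty_title_alt (text : String) : String :=
  String.ofList (pvScanK pvKeys (by decide) text.toList)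

-- ===== PRECONDITION & SPEC =====
def Spec_pretty_title (text : String) (out : String) : Prop := out = pretty_title_alt text
instance (text : String) (out : String) : Decidable (Spec_pretty_title text out) := by unfold Spec_pretty_title; infer_instance

-- ===== CLAIM (what is proved, stated in full; the proofs are below) =====
def Claim_equal_pretty_title : Prop := ∀ (text : String), Dom_pretty_title text → Spec_pretty_title text (pretty_title text)

-- ===== LEMMAS AND PROOFS =====

-- u and w diverge before either ends (neither is a prefix of the other)
def pvIncomp (u w : List Char) : Bool := !u.isPrefixOf w && !w.isPrefixOf u

-- clean well-founded form of Python's s.replace(old, new) for old ≠ ""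
def pvRepl (old new : List Char) (h : old ≠ []) : List Char → List Char
  | [] => []
  | c :: t =>
    if old.isPrefixOf (c :: t) then new ++ pvRepl old new h ((c :: t).drop old.length)
    else c :: pvRepl old new h t
  termination_by s => s.length
  decreasing_by
  · have h2 : 0 < old.length := List.length_pos_of_ne_nil h
    simp only [List.length_drop, List.length_cons]
    omega
  · simp

lemma pvIncomp_not_prefix_append {u w x : List Char} (h : pvIncomp u w = true) :
    ¬ w <+: (u ++ x) := by
  intro hw
  rcases List.prefix_or_prefix_of_prefix hw (List.prefix_append u x) with h1 | h1 <;>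
    simp [pvIncomp, ← List.isPrefixOf_iff_prefix] at h <;>
    rw [← List.isPrefixOf_iff_prefix] at h1 <;> simp [h1] at h

lemma pvRepl_append (old new : List Char) (h : old ≠ []) (a x : List Char)
    (ha : ∀ u ∈ a.tails, u ≠ ([] : List Char) → pvIncomp u old = true) :
    pvRepl old new h (a ++ x) = a ++ pvRepl old new h x := by
  induction a with
  | nil => simp
  | cons c a' ih =>
    have hself : (c :: a') ∈ (c :: a').tails := (List.mem_tails _ _).mpr List.suffix_rfl
    have hnp : ¬ old <+: ((c :: a') ++ x) :=
      pvIncomp_not_prefix_append (ha _ hself (by simp))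
    rw [List.cons_append, pvRepl, if_neg (by rw [List.isPrefixOf_iff_prefix]; exact hnp)]
    rw [ih fun u hu hne => ha u ((List.mem_tails _ _).mpr
      (((List.mem_tails _ _).mp hu).trans (List.suffix_cons c a'))) hne]
    simp

lemma pvRepl_front (old new : List Char) (h : old ≠ []) (x : List Char) :
    pvRepl old new h (old ++ x) = new ++ pvRepl old new h x := by
  obtain ⟨c, t, rfl⟩ : ∃ c t, old = c :: t := by
    cases old with
    | nil => exact absurd rfl h
    | cons c t => exact ⟨c, t, rfl⟩
  rw [List.cons_append, pvRepl,
    if_pos (by rw [List.isPrefixOf_iff_prefix]; exact ⟨x, by simp⟩)]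
  congr 1
  congr 1
  exact List.drop_left

lemma pvScanK_cons_none (ks : List (List Char × List Char))
    (hks : ∀ p ∈ ks, p.1 ≠ ([] : List Char)) (c : Char) (t : List Char)
    (hnone : ks.find? (fun p => p.1.isPrefixOf (c :: t)) = none) :
    pvScanK ks hks (c :: t) = c :: pvScanK ks hks t := by
  rw [pvScanK]
  split
  · rename_i p hp
    rw [hnone] at hp
    cases hp
  · rfl

lemma pvScanK_cons_some (ks : List (List Char × List Char))
    (hks : ∀ p ∈ ks, p.1 ≠ ([] : List Char)) (c : Char) (t : List Char)
    (p : List Char × List Char)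
    (hsome : ks.find? (fun p => p.1.isPrefixOf (c :: t)) = some p) :
    pvScanK ks hks (c :: t) = p.2 ++ pvScanK ks hks ((c :: t).drop p.1.length) := by
  rw [pvScanK]
  split
  · rename_i p' hp'
    rw [hsome] at hp'
    cases hp'
    rfl
  · rename_i hp'
    rw [hsome] at hp'
    cases hp'

lemma pvScanK_nil_keys (h : ∀ p ∈ ([] : List (List Char × List Char)), p.1 ≠ ([] : List Char))
    (s : List Char) : pvScanK [] h s = s := by
  induction s with
  | nil => rw [pvScanK]
  | cons c t ih =>
    rw [pvScanK_cons_none [] h c t (by simp), ih]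

lemma pvScanK_append (ks : List (List Char × List Char)) (hks : ∀ p ∈ ks, p.1 ≠ ([] : List Char))
    (a x : List Char)
    (ha : ∀ u ∈ a.tails, u ≠ ([] : List Char) → ∀ p ∈ ks, ¬ (p.1 <+: (u ++ x))) :
    pvScanK ks hks (a ++ x) = a ++ pvScanK ks hks x := by
  induction a with
  | nil => simp
  | cons c a' ih =>
    have hself : (c :: a') ∈ (c :: a').tails := (List.mem_tails _ _).mpr List.suffix_rfl
    have hnone : ks.find? (fun p => p.1.isPrefixOf ((c :: a') ++ x)) = none := by
      rw [List.find?_eq_none]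
      intro p hp
      simp only [Bool.not_eq_true]
      rw [← Bool.not_eq_true, List.isPrefixOf_iff_prefix]
      exact ha _ hself (by simp) p hp
    rw [List.cons_append, pvScanK_cons_none ks hks c (a' ++ x) hnone]
    rw [ih fun u hu hne => ha u ((List.mem_tails _ _).mpr
      (((List.mem_tails _ _).mp hu).trans (List.suffix_cons c a'))) hne]
    simp

-- a prefix of the scanned output whose suffixes all diverge from every replacement value
-- is already a prefix of the input
lemma pvScanK_prefix_orig (ks : List (List Char × List Char))
    (hks : ∀ p ∈ ks, p.1 ≠ ([] : List Char)) :
    ∀ (n : Nat) (t u : List Char), t.length ≤ n →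
      (∀ u' ∈ u.tails, u' ≠ ([] : List Char) → ∀ p ∈ ks, pvIncomp u' p.2 = true) →
      u <+: pvScanK ks hks t → u <+: t := by
  intro n
  induction n with
  | zero =>
    intro t u hn hu hpre
    have : t = [] := List.eq_nil_of_length_eq_zero (by omega)
    subst this
    rw [pvScanK] at hpre
    exact hpre
  | succ n ih =>
    intro t u hn hu hpre
    cases t with
    | nil =>
      rw [pvScanK] at hpre
      exact hpre
    | cons c t' =>
      rcases hf : ks.find? (fun p => p.1.isPrefixOf (c :: t')) with _ | p
      · rw [pvScanK_cons_none ks hks c t' hf] at hpre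
        cases u with
        | nil => exact List.nil_prefix
        | cons c0 u'' =>
          rw [List.cons_prefix_cons] at hpre
          obtain ⟨rfl, hpre'⟩ := hpre
          have hu'' : u'' <+: t' := by
            refine ih t' u'' (by simp at hn; omega) ?_ hpre'
            intro u' hu' hne p hp
            exact hu u' ((List.mem_tails _ _).mpr
              (((List.mem_tails _ _).mp hu').trans (List.suffix_cons c0 u''))) hne p hp
          exact (List.cons_prefix_cons).mpr ⟨rfl, hu''⟩
      · rw [pvScanK_cons_some ks hks c t' p hf] at hpre
        cases u with
        | nil => exact List.nil_prefix
        | cons c0 u'' =>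
          exfalso
          have hself : (c0 :: u'') ∈ (c0 :: u'').tails := (List.mem_tails _ _).mpr List.suffix_rfl
          have hinc := hu _ hself (by simp) p (List.mem_of_find?_eq_some hf)
          rcases List.prefix_or_prefix_of_prefix hpre (List.prefix_append p.2 _) with h1 | h1 <;>
            simp [pvIncomp, ← List.isPrefixOf_iff_prefix] at hinc <;>
            rw [← List.isPrefixOf_iff_prefix] at h1 <;> simp [h1] at hinc

-- one pass of replace over the scan of the earlier keys = scan with the new key appended
lemma pvStep (ks : List (List Char × List Char)) (hks : ∀ p ∈ ks, p.1 ≠ ([] : List Char))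
    (k v : List Char) (hk : k ≠ [])
    (hks' : ∀ p ∈ ks ++ [(k, v)], p.1 ≠ ([] : List Char))
    (hvk : ∀ p ∈ ks, ∀ u ∈ p.2.tails, u ≠ ([] : List Char) → pvIncomp u k = true)
    (hkk : ∀ u ∈ k.tails, u ≠ ([] : List Char) → u ≠ k → ∀ p ∈ ks, pvIncomp u p.1 = true)
    (hkv : ∀ u ∈ k.tails, u ≠ ([] : List Char) → u ≠ k → ∀ p ∈ ks, pvIncomp u p.2 = true) :
    ∀ (n : Nat) (s : List Char), s.length ≤ n →
      pvRepl k v hk (pvScanK ks hks s) = pvScanK (ks ++ [(k, v)]) hks' s := by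
  intro n
  induction n with
  | zero =>
    intro s hn
    have : s = [] := List.eq_nil_of_length_eq_zero (by omega)
    subst this
    rw [pvScanK, pvScanK, pvRepl]
  | succ n ih =>
    intro s hn
    cases s with
    | nil => rw [pvScanK, pvScanK, pvRepl]
    | cons c t =>
      rcases hf : ks.find? (fun p => p.1.isPrefixOf (c :: t)) with _ | p
      · by_cases hkp : k <+: (c :: t)
        · obtain ⟨u, hu⟩ := hkp
          have hscan : pvScanK ks hks (k ++ u) = k ++ pvScanK ks hks u := by
            apply pvScanK_append
            intro u' hu' hne p hp
            by_cases hq : u' = k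
            · subst hq
              rw [hu]
              intro hcon
              have hnf := List.find?_eq_none.mp hf p hp
              simp only [Bool.not_eq_true] at hnf
              rw [← Bool.not_eq_true, List.isPrefixOf_iff_prefix] at hnf
              exact hnf hcon
            · exact pvIncomp_not_prefix_append (hkk u' hu' hne hq p hp)
          have hf' : (ks ++ [(k, v)]).find? (fun p => p.1.isPrefixOf (c :: t)) = some (k, v) := by
            rw [List.find?_append, hf]
            simp only [Option.none_or, List.find?_cons]
            have : k.isPrefixOf (c :: t) = true := by
              rw [List.isPrefixOf_iff_prefix]
              exact ⟨u, hu⟩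
            simp [this]
          have hdrop : (c :: t).drop k.length = u := by
            rw [← hu]
            exact List.drop_left
          rw [pvScanK_cons_some _ hks' c t (k, v) hf', hdrop, ← hu, hscan, pvRepl_front]
          congr 1
          apply ih
          have hlen := congrArg List.length hu
          simp only [List.length_append, List.length_cons] at hlen hn ⊢
          have hkpos : 0 < k.length := List.length_pos_of_ne_nil hk
          omega
        · have hnp : ¬ k <+: (c :: pvScanK ks hks t) := by
            intro hcon
            cases k with
            | nil => exact hk rfl
            | cons c0 k' =>
              rw [List.cons_prefix_cons] at hcon
              obtain ⟨rfl, hpre'⟩ := hcon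
              have hk'ne : k' ≠ [] := by
                rintro rfl
                exact hkp ((List.cons_prefix_cons).mpr ⟨rfl, List.nil_prefix⟩)
              have hk't : k' <+: t := by
                apply pvScanK_prefix_orig ks hks t.length t k' le_rfl ?_ hpre'
                intro u' hu' hne p hp
                apply hkv u' ?_ hne ?_ p hp
                · exact (List.mem_tails _ _).mpr
                    (((List.mem_tails _ _).mp hu').trans (List.suffix_cons c0 k'))
                · intro hq
                  have hlen := ((List.mem_tails _ _).mp hu').length_le
                  rw [hq] at hlen
                  simp only [List.length_cons] at hlen
                  omega
              exact hkp ((List.cons_prefix_cons).mpr ⟨rfl, hk't⟩)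
          have hf' : (ks ++ [(k, v)]).find? (fun p => p.1.isPrefixOf (c :: t)) = none := by
            rw [List.find?_append, hf]
            simp only [Option.none_or, List.find?_cons]
            have : ¬ k.isPrefixOf (c :: t) = true := by
              rw [List.isPrefixOf_iff_prefix]
              exact hkp
            simp [this]
          rw [pvScanK_cons_none ks hks c t hf]
          rw [pvRepl, if_neg (by rw [List.isPrefixOf_iff_prefix]; exact hnp),
            pvScanK_cons_none _ hks' c t hf']
          congr 1
          apply ih
          simp only [List.length_cons] at hn
          omega
      · rw [pvScanK_cons_some ks hks c t p hf,
          pvRepl_append k v hk p.2 _ (hvk p (List.mem_of_find?_eq_some hf))]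
        have hf' : (ks ++ [(k, v)]).find? (fun p => p.1.isPrefixOf (c :: t)) = some p := by
          rw [List.find?_append, hf]
          rfl
        rw [pvScanK_cons_some _ hks' c t p hf']
        congr 1
        apply ih
        have hppos : 0 < p.1.length :=
          List.length_pos_of_ne_nil (hks p (List.mem_of_find?_eq_some hf))
        simp only [List.length_drop, List.length_cons] at hn ⊢
        omega

-- Python's s.replace(old, new) (old ≠ "") is pvRepl: first the fueled worker ...
lemma pvGo_spec (old new : List Char) (h : old ≠ []) :
    ∀ (fuel : Nat) (s acc : List Char), s.length ≤ fuel →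
      PySem.Chars.replace.go old new fuel s acc = acc.reverse ++ pvRepl old new h s := by
  intro fuel
  induction fuel with
  | zero =>
    intro s acc hn
    have : s = [] := List.eq_nil_of_length_eq_zero (by omega)
    subst this
    rw [PySem.Chars.replace.go, pvRepl]
  | succ fuel ih =>
    intro s acc hn
    cases s with
    | nil =>
      rw [PySem.Chars.replace.go, pvRepl]
      all_goals simp
    | cons c t =>
      rw [PySem.Chars.replace.go]
      by_cases hp : old.isPrefixOf (c :: t)
      · rw [if_pos hp, pvRepl, if_pos hp]
        have hlen : (List.drop old.length (c :: t)).length ≤ fuel := by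
          have hpos : 0 < old.length := List.length_pos_of_ne_nil h
          simp only [List.length_drop, List.length_cons] at hn ⊢
          omega
        rw [ih _ _ hlen]
        simp
      · rw [if_neg hp, pvRepl, if_neg hp]
        have hlen : t.length ≤ fuel := by
          simp only [List.length_cons] at hn
          omega
        rw [ih _ _ hlen]
        simp

-- ... then the wrapper
lemma pvReplace_eq (old new : List Char) (h : old ≠ []) (s : List Char) :
    PySem.Chars.replace s old new = pvRepl old new h s := by
  rw [PySem.Chars.replace, if_neg (by simp [List.isEmpty_iff, h]),
    pvGo_spec old new h s.length s [] le_rfl]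
  simp

-- ===== VERDICT (by name: the statement is the Claim_ definition above) =====
theorem pretty_title_spec : Claim_equal_pretty_title := by
  intro text _
  unfold Spec_pretty_title pretty_title pretty_title_alt
  simp only [PySem.Str.replace, String.toList_ofList]
  congr 1
  set s : List Char := text.toList
  have e1 := pvReplace_eq "zero_shot".toList "Zero Shot".toList (by decide) s
  have e2 := pvReplace_eq "one_shot".toList "One Shot".toList (by decide)
  have e3 := pvReplace_eq "logreg_tfidf".toList "LogReg TF-IDF".toList (by decide)
  have e4 := pvReplace_eq "logreg_word2vec".toList "LogReg Word2Vec".toList (by decide)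
  have e5 := pvReplace_eq "macro_f1".toList "Macro-F1".toList (by decide)
  rw [e1, e2, e3, e4, e5]
  have h0 : ∀ p ∈ ([] : List (List Char × List Char)), p.1 ≠ ([] : List Char) := by simp
  have s1 : pvRepl "zero_shot".toList "Zero Shot".toList (by decide) s
      = pvScanK (pvKeys.take 1) (by decide) s := by
    conv_lhs => rw [← pvScanK_nil_keys h0 s]
    exact pvStep [] h0 _ _ (by decide) (by decide) (by decide) (by decide) (by decide)
      s.length s le_rfl
  have s2 : ∀ x : List Char, pvRepl "one_shot".toList "One Shot".toList (by decide)
      (pvScanK (pvKeys.take 1) (by decide) x) = pvScanK (pvKeys.take 2) (by decide) x := by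
    intro x
    exact pvStep (pvKeys.take 1) (by decide) _ _ (by decide) (by decide) (by decide)
      (by decide) (by decide) x.length x le_rfl
  have s3 : ∀ x : List Char, pvRepl "logreg_tfidf".toList "LogReg TF-IDF".toList (by decide)
      (pvScanK (pvKeys.take 2) (by decide) x) = pvScanK (pvKeys.take 3) (by decide) x := by
    intro x
    exact pvStep (pvKeys.take 2) (by decide) _ _ (by decide) (by decide) (by decide)
      (by decide) (by decide) x.length x le_rfl
  have s4 : ∀ x : List Char, pvRepl "logreg_word2vec".toList "LogReg Word2Vec".toList (by decide)
      (pvScanK (pvKeys.take 3) (by decide) x) = pvScanK (pvKeys.take 4) (by decide) x := by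
    intro x
    exact pvStep (pvKeys.take 3) (by decide) _ _ (by decide) (by decide) (by decide)
      (by decide) (by decide) x.length x le_rfl
  have s5 : ∀ x : List Char, pvRepl "macro_f1".toList "Macro-F1".toList (by decide)
      (pvScanK (pvKeys.take 4) (by decide) x) = pvScanK pvKeys (by decide) x := by
    intro x
    exact pvStep (pvKeys.take 4) (by decide) _ _ (by decide) (by decide) (by decide)
      (by decide) (by decide) x.length x le_rfl
  rw [s1, s2, s3, s4, s5]
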